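-- pv_equiv track=rewrite | github.com/themdash135/all-star-astrology | backend/engines/pipeline/adapters/western.py | _dignity_state
-- ===== SOURCE A (Python) =====
-- PLANET_DIGNITY: dict[str, dict[str, list[str]]] = {
--     "Sun": {
--         "domicile": ["Leo"],
--         "exaltation": ["Aries"],
--         "detriment": ["Aquarius"],
--         "fall": ["Libra"],
--     },
--     "Moon": {
--         "domicile": ["Cancer"],
--         "exaltation": ["Taurus"],
--         "detriment": ["Capricorn"],
--         "fall": ["Scorpio"],
--     },
--     "Mercury": {
--         "domicile": ["Gemini", "Virgo"],
--         "exaltation": ["Virgo"],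
--         "detriment": ["Sagittarius", "Pisces"],
--         "fall": ["Pisces"],
--     },
--     "Venus": {
--         "domicile": ["Taurus", "Libra"],
--         "exaltation": ["Pisces"],
--         "detriment": ["Scorpio", "Aries"],
--         "fall": ["Virgo"],
--     },
--     "Mars": {
--         "domicile": ["Aries", "Scorpio"],
--         "exaltation": ["Capricorn"],
--         "detriment": ["Libra", "Taurus"],
--         "fall": ["Cancer"],
--     },
--     "Jupiter": {
--         "domicile": ["Sagittarius", "Pisces"],
--         "exaltation": ["Cancer"],
--         "detriment": ["Gemini", "Virgo"],
--         "fall": ["Capricorn"],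
--     },
--     "Saturn": {
--         "domicile": ["Capricorn", "Aquarius"],
--         "exaltation": ["Libra"],
--         "detriment": ["Cancer", "Leo"],
--         "fall": ["Aries"],
--     },
-- }
--
-- def _dignity_state(planet: str, sign: str) -> str | None:
--     """Return 'domicile', 'exaltation', 'detriment', 'fall', or None."""
--     info = PLANET_DIGNITY.get(planet)
--     if not info:
--         return None
--     for state in ("domicile", "exaltation", "detriment", "fall"):
--         if sign in info[state]:
--             return state
--     return None
-- ===== SOURCE B (Python) =====
-- # Flat lookup table keyed by (planet, sign).  The essential-dignity table is
-- # small and fixed, so instead of scanning per-state sign lists we enumerate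
-- # every (planet, sign) -> state assignment once; collision signs (Mercury's
-- # Virgo and Pisces) carry the higher-priority state, matching A's scan order.
-- _DIGNITY: dict[tuple[str, str], str] = {
--     ("Sun", "Leo"): "domicile",
--     ("Sun", "Aries"): "exaltation",
--     ("Sun", "Aquarius"): "detriment",
--     ("Sun", "Libra"): "fall",
--     ("Moon", "Cancer"): "domicile",
--     ("Moon", "Taurus"): "exaltation",
--     ("Moon", "Capricorn"): "detriment",
--     ("Moon", "Scorpio"): "fall",
--     ("Mercury", "Gemini"): "domicile",
--     ("Mercury", "Virgo"): "domicile",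
--     ("Mercury", "Sagittarius"): "detriment",
--     ("Mercury", "Pisces"): "detriment",
--     ("Venus", "Taurus"): "domicile",
--     ("Venus", "Libra"): "domicile",
--     ("Venus", "Pisces"): "exaltation",
--     ("Venus", "Scorpio"): "detriment",
--     ("Venus", "Aries"): "detriment",
--     ("Venus", "Virgo"): "fall",
--     ("Mars", "Aries"): "domicile",
--     ("Mars", "Scorpio"): "domicile",
--     ("Mars", "Capricorn"): "exaltation",
--     ("Mars", "Libra"): "detriment",
--     ("Mars", "Taurus"): "detriment",
--     ("Mars", "Cancer"): "fall",
--     ("Jupiter", "Sagittarius"): "domicile",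
--     ("Jupiter", "Pisces"): "domicile",
--     ("Jupiter", "Cancer"): "exaltation",
--     ("Jupiter", "Gemini"): "detriment",
--     ("Jupiter", "Virgo"): "detriment",
--     ("Jupiter", "Capricorn"): "fall",
--     ("Saturn", "Capricorn"): "domicile",
--     ("Saturn", "Aquarius"): "domicile",
--     ("Saturn", "Libra"): "exaltation",
--     ("Saturn", "Cancer"): "detriment",
--     ("Saturn", "Leo"): "detriment",
--     ("Saturn", "Aries"): "fall",
-- }
--
--
-- def _dignity_state(planet: str, sign: str) -> str | None:
--     """Return 'domicile', 'exaltation', 'detriment', 'fall', or None."""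
--     return _DIGNITY.get((planet, sign))
-- ===== Notes on version B (the rewrite author's own statement) =====
-- stated objective: simpler
-- what changed: Replaces the nested planet->state->sign-list table and the per-call scan over the four state lists with one flat literal dict keyed by (planet, sign) (collision signs written with their higher-priority state), so the function body is a single dict lookup.
import Mathlib
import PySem

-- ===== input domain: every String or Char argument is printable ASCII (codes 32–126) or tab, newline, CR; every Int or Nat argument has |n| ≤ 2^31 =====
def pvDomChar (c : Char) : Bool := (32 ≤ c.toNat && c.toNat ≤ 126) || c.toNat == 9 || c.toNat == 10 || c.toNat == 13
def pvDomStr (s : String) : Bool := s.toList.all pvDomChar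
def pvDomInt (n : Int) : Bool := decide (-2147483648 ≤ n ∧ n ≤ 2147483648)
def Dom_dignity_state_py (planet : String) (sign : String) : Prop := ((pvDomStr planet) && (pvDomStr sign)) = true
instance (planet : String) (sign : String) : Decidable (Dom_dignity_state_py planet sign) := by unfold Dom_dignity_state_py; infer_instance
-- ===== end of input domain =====

-- B replaces the nested planet->state->sign-list table and the per-call scan over the four
-- state lists with one flat literal table keyed by (planet, sign); objective: simpler lookup.


-- ===== PORT A =====
def pvInfoSun : PySem.Dict String (List String) := PySem.Dict.mk
  [("domicile", ["Leo"]), ("exaltation", ["Aries"]), ("detriment", ["Aquarius"]), ("fall", ["Libra"])]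
def pvInfoMoon : PySem.Dict String (List String) := PySem.Dict.mk
  [("domicile", ["Cancer"]), ("exaltation", ["Taurus"]), ("detriment", ["Capricorn"]), ("fall", ["Scorpio"])]
def pvInfoMercury : PySem.Dict String (List String) := PySem.Dict.mk
  [("domicile", ["Gemini", "Virgo"]), ("exaltation", ["Virgo"]), ("detriment", ["Sagittarius", "Pisces"]), ("fall", ["Pisces"])]
def pvInfoVenus : PySem.Dict String (List String) := PySem.Dict.mk
  [("domicile", ["Taurus", "Libra"]), ("exaltation", ["Pisces"]), ("detriment", ["Scorpio", "Aries"]), ("fall", ["Virgo"])]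
def pvInfoMars : PySem.Dict String (List String) := PySem.Dict.mk
  [("domicile", ["Aries", "Scorpio"]), ("exaltation", ["Capricorn"]), ("detriment", ["Libra", "Taurus"]), ("fall", ["Cancer"])]
def pvInfoJupiter : PySem.Dict String (List String) := PySem.Dict.mk
  [("domicile", ["Sagittarius", "Pisces"]), ("exaltation", ["Cancer"]), ("detriment", ["Gemini", "Virgo"]), ("fall", ["Capricorn"])]
def pvInfoSaturn : PySem.Dict String (List String) := PySem.Dict.mk
  [("domicile", ["Capricorn", "Aquarius"]), ("exaltation", ["Libra"]), ("detriment", ["Cancer", "Leo"]), ("fall", ["Aries"])]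

def pvPlanetDignity : PySem.Dict String (PySem.Dict String (List String)) := PySem.Dict.mk
  [("Sun", pvInfoSun), ("Moon", pvInfoMoon), ("Mercury", pvInfoMercury), ("Venus", pvInfoVenus),
   ("Mars", pvInfoMars), ("Jupiter", pvInfoJupiter), ("Saturn", pvInfoSaturn)]

def pvStates : List String := ["domicile", "exaltation", "detriment", "fall"]

-- A's for-loop with early return; info[state] is ported as (get? …).getD [] — exact
-- here because every table entry carries all four state keys.
def pvLoopA (info : PySem.Dict String (List String)) (sign : String) : List String → Option String
  | [] => none
  | st :: rest => if sign ∈ (info.get? st).getD [] then some st else pvLoopA info sign rest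

def dignity_state_py (planet : String) (sign : String) : Option String :=
  match pvPlanetDignity.get? planet with
  | none => none                                 -- planet not in the table: info is None
  | some info => if info.size = 0 then none      -- 'if not info' (falsy empty dict)
                 else pvLoopA info sign pvStates

-- ===== PORT B =====
-- B's flat literal table: one dict keyed by (planet, sign).
def pvFlat : PySem.Dict (String × String) String := PySem.Dict.mk
  [(("Sun", "Leo"), "domicile"),
   (("Sun", "Aries"), "exaltation"),
   (("Sun", "Aquarius"), "detriment"),
   (("Sun", "Libra"), "fall"),
   (("Moon", "Cancer"), "domicile"),
   (("Moon", "Taurus"), "exaltation"),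
   (("Moon", "Capricorn"), "detriment"),
   (("Moon", "Scorpio"), "fall"),
   (("Mercury", "Gemini"), "domicile"),
   (("Mercury", "Virgo"), "domicile"),
   (("Mercury", "Sagittarius"), "detriment"),
   (("Mercury", "Pisces"), "detriment"),
   (("Venus", "Taurus"), "domicile"),
   (("Venus", "Libra"), "domicile"),
   (("Venus", "Pisces"), "exaltation"),
   (("Venus", "Scorpio"), "detriment"),
   (("Venus", "Aries"), "detriment"),
   (("Venus", "Virgo"), "fall"),
   (("Mars", "Aries"), "domicile"),
   (("Mars", "Scorpio"), "domicile"),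
   (("Mars", "Capricorn"), "exaltation"),
   (("Mars", "Libra"), "detriment"),
   (("Mars", "Taurus"), "detriment"),
   (("Mars", "Cancer"), "fall"),
   (("Jupiter", "Sagittarius"), "domicile"),
   (("Jupiter", "Pisces"), "domicile"),
   (("Jupiter", "Cancer"), "exaltation"),
   (("Jupiter", "Gemini"), "detriment"),
   (("Jupiter", "Virgo"), "detriment"),
   (("Jupiter", "Capricorn"), "fall"),
   (("Saturn", "Capricorn"), "domicile"),
   (("Saturn", "Aquarius"), "domicile"),
   (("Saturn", "Libra"), "exaltation"),
   (("Saturn", "Cancer"), "detriment"),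
   (("Saturn", "Leo"), "detriment"),
   (("Saturn", "Aries"), "fall")]

def dignity_state_py_alt (planet : String) (sign : String) : Option String :=
  pvFlat.get? (planet, sign)

-- ===== PRECONDITION & SPEC =====
def Spec_dignity_state_py (planet : String) (sign : String) (out : Option String) : Prop := out = dignity_state_py_alt planet sign
instance (planet : String) (sign : String) (out : Option String) : Decidable (Spec_dignity_state_py planet sign out) := by unfold Spec_dignity_state_py; infer_instance

-- ===== CLAIM (what is proved, stated in full; the proofs are below) =====
def Claim_equal_dignity_state_py : Prop := ∀ (planet : String) (sign : String), Dom_dignity_state_py planet sign → Spec_dignity_state_py planet sign (dignity_state_py planet sign)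

-- ===== LEMMAS AND PROOFS =====

theorem pv_main (planet sign : String) :
    dignity_state_py planet sign = dignity_state_py_alt planet sign := by
  by_cases hPSun : planet = "Sun"
  · subst hPSun
    by_cases h0 : sign = "Leo"
    · subst h0; decide
    by_cases h1 : sign = "Aries"
    · subst h1; decide
    by_cases h2 : sign = "Aquarius"
    · subst h2; decide
    by_cases h3 : sign = "Libra"
    · subst h3; decide
    simp [dignity_state_py, dignity_state_py_alt, pvLoopA, pvStates, pvPlanetDignity, pvInfoSun, pvFlat,
          PySem.Dict.get?, PySem.Dict.size, h0, h1, h2, h3, Ne.symm h0, Ne.symm h1, Ne.symm h2, Ne.symm h3]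
  by_cases hPMoon : planet = "Moon"
  · subst hPMoon
    by_cases h0 : sign = "Cancer"
    · subst h0; decide
    by_cases h1 : sign = "Taurus"
    · subst h1; decide
    by_cases h2 : sign = "Capricorn"
    · subst h2; decide
    by_cases h3 : sign = "Scorpio"
    · subst h3; decide
    simp [dignity_state_py, dignity_state_py_alt, pvLoopA, pvStates, pvPlanetDignity, pvInfoMoon, pvFlat,
          PySem.Dict.get?, PySem.Dict.size, h0, h1, h2, h3, Ne.symm h0, Ne.symm h1, Ne.symm h2, Ne.symm h3]
  by_cases hPMercury : planet = "Mercury"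
  · subst hPMercury
    by_cases h0 : sign = "Gemini"
    · subst h0; decide
    by_cases h1 : sign = "Virgo"
    · subst h1; decide
    by_cases h2 : sign = "Sagittarius"
    · subst h2; decide
    by_cases h3 : sign = "Pisces"
    · subst h3; decide
    simp [dignity_state_py, dignity_state_py_alt, pvLoopA, pvStates, pvPlanetDignity, pvInfoMercury, pvFlat,
          PySem.Dict.get?, PySem.Dict.size, h0, h1, h2, h3, Ne.symm h0, Ne.symm h1, Ne.symm h2, Ne.symm h3]
  by_cases hPVenus : planet = "Venus"
  · subst hPVenus
    by_cases h0 : sign = "Taurus"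
    · subst h0; decide
    by_cases h1 : sign = "Libra"
    · subst h1; decide
    by_cases h2 : sign = "Pisces"
    · subst h2; decide
    by_cases h3 : sign = "Scorpio"
    · subst h3; decide
    by_cases h4 : sign = "Aries"
    · subst h4; decide
    by_cases h5 : sign = "Virgo"
    · subst h5; decide
    simp [dignity_state_py, dignity_state_py_alt, pvLoopA, pvStates, pvPlanetDignity, pvInfoVenus, pvFlat,
          PySem.Dict.get?, PySem.Dict.size, h0, h1, h2, h3, h4, h5, Ne.symm h0, Ne.symm h1, Ne.symm h2, Ne.symm h3, Ne.symm h4, Ne.symm h5]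
  by_cases hPMars : planet = "Mars"
  · subst hPMars
    by_cases h0 : sign = "Aries"
    · subst h0; decide
    by_cases h1 : sign = "Scorpio"
    · subst h1; decide
    by_cases h2 : sign = "Capricorn"
    · subst h2; decide
    by_cases h3 : sign = "Libra"
    · subst h3; decide
    by_cases h4 : sign = "Taurus"
    · subst h4; decide
    by_cases h5 : sign = "Cancer"
    · subst h5; decide
    simp [dignity_state_py, dignity_state_py_alt, pvLoopA, pvStates, pvPlanetDignity, pvInfoMars, pvFlat,
          PySem.Dict.get?, PySem.Dict.size, h0, h1, h2, h3, h4, h5, Ne.symm h0, Ne.symm h1, Ne.symm h2, Ne.symm h3, Ne.symm h4, Ne.symm h5]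
  by_cases hPJupiter : planet = "Jupiter"
  · subst hPJupiter
    by_cases h0 : sign = "Sagittarius"
    · subst h0; decide
    by_cases h1 : sign = "Pisces"
    · subst h1; decide
    by_cases h2 : sign = "Cancer"
    · subst h2; decide
    by_cases h3 : sign = "Gemini"
    · subst h3; decide
    by_cases h4 : sign = "Virgo"
    · subst h4; decide
    by_cases h5 : sign = "Capricorn"
    · subst h5; decide
    simp [dignity_state_py, dignity_state_py_alt, pvLoopA, pvStates, pvPlanetDignity, pvInfoJupiter, pvFlat,
          PySem.Dict.get?, PySem.Dict.size, h0, h1, h2, h3, h4, h5, Ne.symm h0, Ne.symm h1, Ne.symm h2, Ne.symm h3, Ne.symm h4, Ne.symm h5]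
  by_cases hPSaturn : planet = "Saturn"
  · subst hPSaturn
    by_cases h0 : sign = "Capricorn"
    · subst h0; decide
    by_cases h1 : sign = "Aquarius"
    · subst h1; decide
    by_cases h2 : sign = "Libra"
    · subst h2; decide
    by_cases h3 : sign = "Cancer"
    · subst h3; decide
    by_cases h4 : sign = "Leo"
    · subst h4; decide
    by_cases h5 : sign = "Aries"
    · subst h5; decide
    simp [dignity_state_py, dignity_state_py_alt, pvLoopA, pvStates, pvPlanetDignity, pvInfoSaturn, pvFlat,
          PySem.Dict.get?, PySem.Dict.size, h0, h1, h2, h3, h4, h5, Ne.symm h0, Ne.symm h1, Ne.symm h2, Ne.symm h3, Ne.symm h4, Ne.symm h5]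
  simp [dignity_state_py, dignity_state_py_alt, pvPlanetDignity, pvFlat, PySem.Dict.get?,
        Ne.symm hPSun, Ne.symm hPMoon, Ne.symm hPMercury, Ne.symm hPVenus, Ne.symm hPMars, Ne.symm hPJupiter, Ne.symm hPSaturn]

-- ===== VERDICT (by name: the statement is the Claim_ definition above) =====
theorem dignity_state_py_spec : Claim_equal_dignity_state_py := by
  intro planet sign _
  unfold Spec_dignity_state_py
  exact pv_main planet sign
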